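-- pv_equiv track=rewrite | github.com/daniel-reich/turbo-robot | oRwcjPMkyznd2ybRW_7.py | max_product
-- ===== SOURCE A (Python) =====
-- def max_product(n,c=0):
--   max=0;l=[]
--   for i in range(1,n+1):
--     p=1
--     for j in str(i):
--       p=p*int(j)
--     if max<p:
--       max=p
--       a=i
--       if c==1:
--         l=[]
--         c=0
--     elif max==p:
--       l.append(i)
--       c=1
--   l=[a]+l
--   return l
-- ===== SOURCE B (Python) =====
-- def max_product(n, c=0):
--     prods = []
--     for i in range(1, n + 1):
--         prods.append(i if i < 10 else prods[i // 10 - 1] * (i % 10))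
--     m = max(prods)
--     return [i for i in range(1, n + 1) if prods[i - 1] == m]
-- ===== Notes on version B (the rewrite author's own statement) =====
-- stated objective: faster
-- what changed: Replaced A's stateful single pass (running max, tie list rebuilt via the clear-flag c, digit product recomputed from str(i) for every i) by an O(1)-per-entry table of digit products built with the recurrence prods[i//10-1]*(i%10), then max over the table and a filter of the achievers.
import Mathlib
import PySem

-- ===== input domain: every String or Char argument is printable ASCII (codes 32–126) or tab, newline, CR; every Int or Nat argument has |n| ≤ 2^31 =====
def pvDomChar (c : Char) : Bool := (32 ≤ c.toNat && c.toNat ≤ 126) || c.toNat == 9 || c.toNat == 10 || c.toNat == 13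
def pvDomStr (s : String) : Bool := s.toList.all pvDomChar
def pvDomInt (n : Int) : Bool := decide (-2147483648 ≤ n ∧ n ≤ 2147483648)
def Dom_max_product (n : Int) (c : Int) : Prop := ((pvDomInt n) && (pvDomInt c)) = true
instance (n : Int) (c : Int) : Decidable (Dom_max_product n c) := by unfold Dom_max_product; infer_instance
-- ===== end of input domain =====

-- B replaces A's stateful pass (running max, tie list, clear-flag c; digit product re-done
-- from str(i) for every i) by a table of digit products filled in O(1) per entry via
-- prods[i//10 - 1], then max over it and a filter of the achievers; both raise for n < 1.

-- ===== PORT A =====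

-- int(j) for the single character j; for the digit characters produced by str(i), i ≥ 1,
-- this is never none, so the .getD 0 default is never used inside Pre_.
def pvVal (j : Char) : Int := (PySem.Int.ofChars? [j]).getD 0

-- one iteration of A's outer loop; state = (max, a, l, c)
def pvStepA (st : Int × Int × List Int × Int) (i : Int) : Int × Int × List Int × Int :=
  let p := (PySem.Int.toChars i).foldl (fun p j => p * pvVal j) 1
  match st with
  | (m, a, l, c) =>
    if m < p then (p, i, if c == 1 then [] else l, if c == 1 then 0 else c)
    else if m == p then (m, a, l ++ [i], 1)
    else (m, a, l, c)

-- 'a' starts unassigned in Python (NameError for n < 1, excluded by Pre_); modelled by 0,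
-- always overwritten on the first iteration since n ≥ 1.
def max_product (n : Int) (c : Int) : List Int :=
  match (PySem.List.pyRange 1 (n + 1) 1).foldl pvStepA (0, 0, ([] : List Int), c) with
  | (_, a, l, _) => a :: l

-- ===== PORT B =====

-- one iteration of B's table-filling loop; a Python list with O(1) append is an Array here.
-- In the else-branch i ≥ 10, so the index i // 10 - 1 is nonnegative and < len(prods):
-- the .toNat and the default 0 are never actually used.
def pvStepB (prods : Array Int) (i : Int) : Array Int :=
  prods.push (if i < 10 then i
              else prods.getD (PySem.Int.floordiv i 10 - 1).toNat 0 * PySem.Int.mod i 10)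

-- max(prods) raises on an empty range (n < 1, outside Pre_); the .getD 0 defaults are never
-- used inside Pre_ (the comprehension only reads prods[i-1] for 1 ≤ i ≤ n = len(prods)).
def max_product_alt (n : Int) (c : Int) : List Int :=
  let prods := (PySem.List.pyRange 1 (n + 1) 1).foldl pvStepB #[]
  let m := (PySem.List.max? prods.toList (fun x => x)).getD 0
  (PySem.List.pyRange 1 (n + 1) 1).filter (fun i => prods.getD (i - 1).toNat 0 == m)

-- ===== PRECONDITION & SPEC =====
-- For n < 1 the loop never runs: A raises UnboundLocalError at 'l=[a]+l' and B's max() raises ValueError.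
def Pre_max_product (n : Int) (c : Int) : Prop := 1 ≤ n
instance (n : Int) (c : Int) : Decidable (Pre_max_product n c) := by unfold Pre_max_product; infer_instance
def pvWitness_max_product : Int × Int := (12, 0)

def Spec_max_product (n : Int) (c : Int) (out : List Int) : Prop := out = max_product_alt n c
instance (n : Int) (c : Int) (out : List Int) : Decidable (Spec_max_product n c out) := by unfold Spec_max_product; infer_instance

-- ===== CLAIM (what is proved, stated in full; the proofs are below) =====
def Claim_equal_max_product : Prop := ∀ (n : Int) (c : Int), Dom_max_product n c → Pre_max_product n c → Spec_max_product n c (max_product n c)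

-- ===== LEMMAS AND PROOFS =====

-- the semantic digit product (proof-side only): what both ports compute per i
def pvDp (i : Int) : Int :=
  if i < 10 then i else pvDp (PySem.Int.floordiv i 10) * (PySem.Int.mod i 10)
termination_by i.toNat
decreasing_by
  rw [PySem.Int.floordiv_eq_ediv_of_pos (by omega)]
  omega


-- Nat-level digit product, used to relate pvDp with the digits str(i) produces
def pvDpN (m : Nat) : Int :=
  if m < 10 then (m : Int) else pvDpN (m / 10) * ((m % 10 : Nat) : Int)

lemma pvDp_natCast (m : Nat) : pvDp (m : Int) = pvDpN m := by
  induction m using Nat.strong_induction_on with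
  | _ m ih =>
    rw [pvDp, pvDpN]
    by_cases h : m < 10
    · simp [h, show (m : Int) < 10 by exact_mod_cast h]
    · have h' : ¬ ((m : Int) < 10) := by exact_mod_cast h
      simp only [h, h', if_false]
      have hfd : PySem.Int.floordiv (m : Int) 10 = ((m / 10 : Nat) : Int) := by
        rw [PySem.Int.floordiv_eq_ediv_of_pos (by norm_num)]; omega
      have hmd : PySem.Int.mod (m : Int) 10 = ((m % 10 : Nat) : Int) := by
        rw [PySem.Int.mod_eq_emod_of_pos (by norm_num)]; omega
      rw [hfd, hmd, ih (m / 10) (by omega)]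

lemma pvVal_digitChar (d : Nat) (h : d < 10) : pvVal (Nat.digitChar d) = (d : Int) := by
  interval_cases d <;> decide

lemma pvDpN_ten_le (m : Nat) (h : 10 ≤ m) : pvDpN m = pvDpN (m / 10) * ((m % 10 : Nat) : Int) := by
  rw [pvDpN]; simp [Nat.not_lt.mpr h]

-- product of the digit values of Nat.toDigitsCore
lemma pvProd_toDigitsCore : ∀ (fuel m : Nat) (ds : List Char), 0 < fuel → m < 10 ^ fuel →
    ((Nat.toDigitsCore 10 fuel m ds).map pvVal).prod = pvDpN m * ((ds.map pvVal).prod) := by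
  intro fuel
  induction fuel with
  | zero => intro m ds h; omega
  | succ f ih =>
    intro m ds _ hm
    rw [Nat.toDigitsCore]
    by_cases h0 : m / 10 = 0
    · have hlt : m < 10 := by omega
      simp only [h0, if_true, List.map_cons, List.prod_cons]
      rw [pvVal_digitChar (m % 10) (by omega), pvDpN, if_pos hlt, Nat.mod_eq_of_lt hlt]
    · have hge : 10 ≤ m := by omega
      have hf : 0 < f := by
        rcases Nat.eq_zero_or_pos f with h | h
        · subst h; simp at hm; omega
        · exact h
      have hm' : m / 10 < 10 ^ f := by
        exact Nat.div_lt_of_lt_mul (by rw [pow_succ] at hm; omega)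
      simp only [h0, if_false]
      rw [ih (m / 10) _ hf hm', pvDpN_ten_le m hge]
      simp only [List.map_cons, List.prod_cons]
      rw [pvVal_digitChar (m % 10) (by omega)]
      ring

-- A's inner string loop computes pvDp, for i ≥ 0
lemma pvInner_eq_dp (i : Int) (hi : 0 ≤ i) :
    (PySem.Int.toChars i).foldl (fun p j => p * pvVal j) 1 = pvDp i := by
  have hfold : ∀ (cs : List Char) (acc : Int),
      cs.foldl (fun p j => p * pvVal j) acc = acc * (cs.map pvVal).prod := by
    intro cs
    induction cs with
    | nil => simp
    | cons x t iht => intro acc; simp [iht, mul_assoc]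
  have hneg : ¬ i < 0 := by omega
  rw [PySem.Int.toChars, if_neg hneg, Nat.toDigits, hfold]
  rw [pvProd_toDigitsCore (i.toNat + 1) i.toNat [] (by omega)
      (lt_of_lt_of_le (Nat.lt_pow_self (by omega)) (Nat.pow_le_pow_right (by omega) (by omega)))]
  simp only [List.map_nil, List.prod_nil, mul_one, one_mul]
  rw [← pvDp_natCast, Int.toNat_of_nonneg hi]

-- Array.getD reads the same entry as List.getD on toList
lemma pvArrGetD (arr : Array Int) (n : Nat) (d : Int) : arr.getD n d = arr.toList.getD n d := by
  unfold Array.getD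
  split
  · next h => rw [List.getD_eq_getElem _ _ (by simpa using h)]; simp
  · next h => rw [List.getD_eq_default _ _ (by simpa using Nat.le_of_not_lt h)]

-- pvDp matches B's recurrence prods[i//10-1] * (i%10)
lemma pvStepB_value (i : Int) (k : Nat) (hik : i = (k : Int) + 1) (arr : Array Int)
    (harr : arr.toList = (PySem.List.pyRange 1 ((k : Int) + 1) 1).map pvDp) :
    (pvStepB arr i).toList = arr.toList ++ [pvDp i] := by
  rw [pvStepB, Array.toList_push]
  by_cases h10 : i < 10
  · rw [if_pos h10, pvDp, if_pos h10]
  · rw [if_neg h10]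
    have hq : PySem.Int.floordiv i 10 = i / 10 := PySem.Int.floordiv_eq_ediv_of_pos (by norm_num)
    set jn : Nat := (PySem.Int.floordiv i 10 - 1).toNat with hjn
    have hj1 : (jn : Int) = i / 10 - 1 := by rw [hjn, hq]; omega
    have hjlt : jn < (((k : Int) + 1) - 1).toNat := by omega
    rw [pvArrGetD, harr, ← PySem.List.pyGetD_natCast,
        PySem.List.pyGetD_map_pyRange_one pvDp 1 ((k : Int) + 1) jn 0 hjlt]
    rw [show pvDp i = pvDp (PySem.Int.floordiv i 10) * PySem.Int.mod i 10 by rw [pvDp, if_neg h10]]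
    rw [hq, show (1 : Int) + (jn : Int) = i / 10 by omega]

-- B's table-filling loop builds the digit products of 1..k
lemma pvProdsB (k : Nat) :
    ((PySem.List.pyRange 1 ((k : Int) + 1) 1).foldl pvStepB #[]).toList
      = (PySem.List.pyRange 1 ((k : Int) + 1) 1).map pvDp := by
  induction k with
  | zero =>
    rw [show ((0 : Nat) : Int) + 1 = 1 by norm_num, PySem.List.pyRange_one_eq_nil (by omega)]
    rfl
  | succ m ih =>
    have hcast : (((m + 1 : Nat)) : Int) = (m : Int) + 1 := by push_cast; ring
    rw [hcast, PySem.List.pyRange_one_succ_right (by omega), List.foldl_append, List.map_append,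
        List.foldl_cons, List.foldl_nil,
        pvStepB_value ((m : Int) + 1) m rfl _ ih, ih]
    simp

-- the loop invariant: state after processing 1..k
def pvInv (k : Int) (st : Int × Int × List Int × Int) : Prop :=
  match st with
  | (M, A, L, c) =>
    1 ≤ A ∧ A ≤ k ∧ pvDp A = M ∧
    (∀ i : Int, 1 ≤ i → i ≤ k → pvDp i ≤ M) ∧
    (∀ i : Int, 1 ≤ i → i < A → pvDp i < M) ∧
    L = (PySem.List.pyRange (A + 1) (k + 1) 1).filter (fun i => pvDp i == M) ∧
    (c = 1 ↔ L ≠ [])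

lemma pvStepA_preserves (k : Int) (hk : 1 ≤ k) (st : Int × Int × List Int × Int)
    (h : pvInv k st) : pvInv (k + 1) (pvStepA st (k + 1)) := by
  obtain ⟨M, A, L, c⟩ := st
  obtain ⟨hA1, hAk, hdpA, hle, hlt, hL, hc⟩ := h
  have hp : (PySem.Int.toChars (k + 1)).foldl (fun p j => p * pvVal j) 1 = pvDp (k + 1) :=
    pvInner_eq_dp (k + 1) (by omega)
  rw [pvStepA]
  simp only [hp]
  by_cases hlt1 : M < pvDp (k + 1)
  · simp only [hlt1, if_true]
    have hLnil : (if c == 1 then ([] : List Int) else L) = [] := by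
      by_cases hc1 : c = 1
      · simp [hc1]
      · have : L = [] := by
          by_contra hne
          exact hc1 (hc.mpr hne)
        simp [this]
    rw [hLnil]
    refine ⟨by omega, by omega, rfl, ?_, ?_, ?_, ?_⟩
    · intro i h1 h2
      by_cases hik : i ≤ k
      · exact le_of_lt (lt_of_le_of_lt (hle i h1 hik) hlt1)
      · have : i = k + 1 := by omega
        subst this; exact le_refl _
    · intro i h1 h2
      exact lt_of_le_of_lt (hle i h1 (by omega)) hlt1
    · rw [PySem.List.pyRange_one_eq_nil (by omega)]; simp
    · by_cases hc1 : c = 1 <;> simp [hc1]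
  · by_cases heq : M = pvDp (k + 1)
    · simp only [hlt1, if_false, show (M == pvDp (k+1)) = true by simp [heq], if_true]
      refine ⟨hA1, by omega, hdpA, ?_, ?_, ?_, ?_⟩
      · intro i h1 h2
        by_cases hik : i ≤ k
        · exact hle i h1 hik
        · have : i = k + 1 := by omega
          subst this; omega
      · exact hlt
      · rw [show (k : Int) + 1 + 1 = (k + 1) + 1 by ring,
            PySem.List.pyRange_one_succ_right (by omega), List.filter_append, ← hL]
        simp [← heq]
      · simp
    · have hgt : pvDp (k + 1) < M := by omega
      simp only [hlt1, if_false, show (M == pvDp (k+1)) = false by simp [heq], Bool.false_eq_true,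
        if_false]
      refine ⟨hA1, by omega, hdpA, ?_, hlt, ?_, hc⟩
      · intro i h1 h2
        by_cases hik : i ≤ k
        · exact hle i h1 hik
        · have : i = k + 1 := by omega
          subst this; omega
      · rw [show (k : Int) + 1 + 1 = (k + 1) + 1 by ring,
            PySem.List.pyRange_one_succ_right (by omega), List.filter_append, ← hL]
        have : (pvDp (k+1) == M) = false := by simp; omega
        simp [this]

lemma pvLoop_inv (k : Nat) (hk : 1 ≤ k) (c0 : Int) :
    pvInv (k : Int) ((PySem.List.pyRange 1 ((k : Int) + 1) 1).foldl pvStepA (0, 0, ([] : List Int), c0)) := by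
  induction k with
  | zero => omega
  | succ m ih =>
    by_cases hm : 1 ≤ m
    · have step := pvStepA_preserves (m : Int) (by exact_mod_cast hm) _ (ih hm)
      have hcast : (((m + 1 : Nat)) : Int) = (m : Int) + 1 := by push_cast; ring
      rw [hcast, PySem.List.pyRange_one_succ_right (by omega), List.foldl_append]
      simpa using step
    · have hm0 : m = 0 := by omega
      subst hm0
      rw [show (((0 + 1 : Nat)) : Int) = 1 by norm_num,
          show PySem.List.pyRange 1 (1 + 1) 1 = [1] from PySem.List.pyRange_one_singleton 1]
      simp only [List.foldl_cons, List.foldl_nil]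
      have hp : (PySem.Int.toChars 1).foldl (fun p j => p * pvVal j) 1 = pvDp 1 :=
        pvInner_eq_dp 1 (by omega)
      have hdp1 : pvDp 1 = 1 := by rw [pvDp]; norm_num
      have hstep : pvStepA (0, 0, ([] : List Int), c0) 1
          = (1, 1, ([] : List Int), if c0 == 1 then 0 else c0) := by
        rw [pvStepA]; simp [hp, hdp1]
      rw [hstep, pvInv]
      refine ⟨le_refl 1, le_refl 1, hdp1, ?_, ?_, ?_, ?_⟩
      · intro i h1 h2
        have : i = 1 := by omega
        subst this; simp [hdp1]
      · intro i h1 h2; omega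
      · rw [PySem.List.pyRange_one_eq_nil (by omega)]; simp
      · by_cases hc1 : c0 = 1 <;> simp [hc1]

theorem max_product_spec : Claim_equal_max_product := by
  intro n c _ hpre
  unfold Spec_max_product
  have hn1 : 1 ≤ n := hpre
  have hnk : n = ((n.toNat : Nat) : Int) := by omega
  have hk1 : 1 ≤ n.toNat := by omega
  have hinv := pvLoop_inv n.toNat hk1 c
  rw [max_product, max_product_alt, hnk]
  set arr := (PySem.List.pyRange 1 (((n.toNat : Nat) : Int) + 1) 1).foldl pvStepB #[] with harrdef
  have hprods : arr.toList = (PySem.List.pyRange 1 (((n.toNat : Nat) : Int) + 1) 1).map pvDp :=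
    pvProdsB n.toNat
  rw [hprods]
  set st := (PySem.List.pyRange 1 ((n.toNat : Int) + 1) 1).foldl pvStepA (0, 0, ([] : List Int), c) with hst
  obtain ⟨M, A, L, c'⟩ := st
  obtain ⟨hA1, hAk, hdpA, hle, hlt, hL, hc⟩ := hinv
  set r := PySem.List.pyRange 1 ((n.toNat : Int) + 1) 1 with hr
  have hAmem : A ∈ r := by
    rw [hr, PySem.List.mem_pyRange_one]; omega
  have hmax : PySem.List.max? (r.map pvDp) (fun x => x) = some M := by
    have hne : r.map pvDp ≠ [] := by
      intro h
      rw [List.map_eq_nil_iff] at h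
      rw [h] at hAmem
      simp at hAmem
    obtain ⟨m', hm'⟩ : ∃ m', PySem.List.max? (r.map pvDp) (fun x => x) = some m' := by
      cases hcase : PySem.List.max? (r.map pvDp) (fun x => x) with
      | none => exact absurd ((PySem.List.max?_eq_none_iff _ _).mp hcase) hne
      | some m' => exact ⟨m', rfl⟩
    have h1 : m' ≤ M := by
      have hmem := PySem.List.max?_mem hm'
      rw [List.mem_map] at hmem
      obtain ⟨j, hj, hjm⟩ := hmem
      rw [hr, PySem.List.mem_pyRange_one] at hj
      rw [← hjm]
      exact hle j hj.1 (by omega)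
    have h2 : M ≤ m' := by
      have := PySem.List.max?_isMax hm' M (by rw [List.mem_map]; exact ⟨A, hAmem, hdpA⟩)
      simpa using this
    rw [hm']
    congr 1
    omega
  rw [hmax]
  simp only [Option.getD_some]
  have hfc : ∀ i ∈ r, (arr.getD (i - 1).toNat 0 == M) = (pvDp i == M) := by
    intro i hi
    rw [hr, PySem.List.mem_pyRange_one] at hi
    have hread : arr.getD (i - 1).toNat 0 = pvDp i := by
      rw [pvArrGetD, hprods, ← PySem.List.pyGetD_natCast,
          PySem.List.pyGetD_map_pyRange_one pvDp 1 (((n.toNat : Nat) : Int) + 1) (i - 1).toNat 0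
            (by omega),
          show (1 : Int) + (((i - 1).toNat : Nat) : Int) = i by omega]
    rw [hread]
  rw [List.filter_congr hfc]
  have hsplit : r = PySem.List.pyRange 1 A 1 ++ [A] ++ PySem.List.pyRange (A + 1) ((n.toNat : Int) + 1) 1 := by
    rw [hr, PySem.List.pyRange_one_append 1 (A + 1) ((n.toNat : Int) + 1) (by omega) (by omega),
        PySem.List.pyRange_one_succ_right (by omega)]
  rw [hsplit, List.filter_append, List.filter_append]
  have hfilt1 : (PySem.List.pyRange 1 A 1).filter (fun i => pvDp i == M) = [] := by
    rw [List.filter_eq_nil_iff]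
    intro i hi
    rw [PySem.List.mem_pyRange_one] at hi
    have := hlt i hi.1 hi.2
    simp
    omega
  have hfilt2 : ([A] : List Int).filter (fun i => pvDp i == M) = [A] := by
    simp [hdpA]
  rw [hfilt1, hfilt2, ← hL]
  simp
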